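-- pv_equiv track=rewrite | github.com/ZixiangLiu/Data-Ming-K-Means | getword.py | combinedictionary
-- ===== SOURCE A (Python) =====
-- def combinedictionary(all_dictionary):
-- 	'''
-- 	Combine a list of dictionaries into a large dictionary
--
-- 	Args:
-- 		all_dictionary:		a list of dictionaries of each blog
-- 	Return:
-- 		large_dictionary:	one dicionaries that has word as the key, and  a list of frequencies of that word in each blog
-- 	'''
-- 	large_dictionary = {}
-- 	length = len(all_dictionary)
-- 	for i in range(0, length): # i indicates the index of the blog
-- 		for singleword, singlecount in all_dictionary[i].items():
-- 			if singleword in large_dictionary.keys(): # if already in the list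
-- 				large_dictionary[singleword][i] = singlecount
-- 			else: # if not initalize to a list
-- 				large_dictionary[singleword] = [0]*length
-- 				large_dictionary[singleword][i] = singlecount;
-- 	return large_dictionary
-- ===== SOURCE B (Python) =====
-- def combinedictionary(all_dictionary):
--     words = dict.fromkeys(w for blog in all_dictionary for w in blog)
--     return {w: [blog.get(w, 0) for blog in all_dictionary] for w in words}
-- ===== Notes on version B (the rewrite author's own statement) =====
-- stated objective: simpler
-- what changed: A iterates blog-major, mutating a shared dict with an if/else membership branch and in-place index writes into pre-sized zero lists; B first dedups the words once and then builds each word's full per-blog column in a single word-major gather with get(w, 0), with no mutation and no branch.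
import Mathlib
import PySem

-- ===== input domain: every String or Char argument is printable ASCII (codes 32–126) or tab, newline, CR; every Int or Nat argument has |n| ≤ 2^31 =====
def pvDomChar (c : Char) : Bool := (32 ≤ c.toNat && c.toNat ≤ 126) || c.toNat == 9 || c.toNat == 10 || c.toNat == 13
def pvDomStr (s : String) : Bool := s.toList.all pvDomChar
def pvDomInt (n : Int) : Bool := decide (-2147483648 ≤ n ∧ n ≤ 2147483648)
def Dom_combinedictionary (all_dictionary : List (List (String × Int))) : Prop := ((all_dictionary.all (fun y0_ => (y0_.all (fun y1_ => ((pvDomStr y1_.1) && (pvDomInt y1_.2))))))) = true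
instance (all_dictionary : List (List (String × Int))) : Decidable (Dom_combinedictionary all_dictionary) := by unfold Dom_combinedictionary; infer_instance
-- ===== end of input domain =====

-- B replaces A's blog-major mutation loop (membership branch + in-place index writes) by a
-- word-major gather: dedup the words once, then one get-with-default per (word, blog).  Objective: simpler.

-- ===== PORT A =====
def combinedictionary (all_dictionary : List (List (String × Int))) : List (String × List Int) :=
  let length : Int := all_dictionary.length
  ((PySem.List.pyRange 0 length 1).foldl (fun d i =>
      (PySem.List.pyGetD all_dictionary i []).foldl (fun d p =>
        if d.contains p.1 then
          d.insert p.1 (PySem.List.pySetD (d.getD p.1 []) i p.2)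
        else
          d.insert p.1 (PySem.List.pySetD (List.replicate length.toNat (0 : Int)) i p.2)) d)
    PySem.Dict.empty).items

-- ===== PORT B =====
def combinedictionary_alt (all_dictionary : List (List (String × Int))) : List (String × List Int) :=
  let words := PySem.List.dedup (all_dictionary.flatMap (fun blog => blog.map Prod.fst))
  words.map (fun w => (w, all_dictionary.map (fun blog => (PySem.Dict.mk blog).getD w 0)))

-- ===== PRECONDITION & SPEC =====
-- Pre_ excludes association lists in which some blog carries a duplicate key: such lists do not
-- represent a Python dict (dict construction collapses duplicates), so their reading is ambiguous.
def Pre_combinedictionary (all_dictionary : List (List (String × Int))) : Prop :=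
  ∀ blog ∈ all_dictionary, (blog.map Prod.fst).Nodup
instance (all_dictionary : List (List (String × Int))) : Decidable (Pre_combinedictionary all_dictionary) := by unfold Pre_combinedictionary; infer_instance

def pvWitness_combinedictionary : (List (List (String × Int))) := [[("a", 2), ("b", 1)], [("b", 3)]]

def Spec_combinedictionary (all_dictionary : List (List (String × Int))) (out : List (String × List Int)) : Prop := out = combinedictionary_alt all_dictionary
instance (all_dictionary : List (List (String × Int))) (out : List (String × List Int)) : Decidable (Spec_combinedictionary all_dictionary out) := by unfold Spec_combinedictionary; infer_instance

-- ===== CLAIM (what is proved, stated in full; the proofs are below) =====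
def Claim_equal_combinedictionary : Prop := ∀ (all_dictionary : List (List (String × Int))), Dom_combinedictionary all_dictionary → Pre_combinedictionary all_dictionary → Spec_combinedictionary all_dictionary (combinedictionary all_dictionary)

-- ===== LEMMAS AND PROOFS =====

-- first-match lookup with default 0, as B performs it (pvGw blog w is definitionally B's per-blog gather)
def pvGw (blog : List (String × Int)) (w : String) : Int := (PySem.Dict.mk blog).getD w 0

-- the words of the first k blogs, in order
def pvKeys (all_dictionary : List (List (String × Int))) (k : Nat) : List String :=
  (all_dictionary.take k).flatMap (fun b => b.map Prod.fst)

-- the column A has built for w after the first k blogs and a prefix `pre` of blog k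
def pvCol2 (all_dictionary : List (List (String × Int))) (k : Nat) (pre : List (String × Int)) (w : String) : List Int :=
  (List.range all_dictionary.length).map
    (fun j => if j < k then pvGw (all_dictionary.getD j []) w else if j = k then pvGw pre w else 0)

-- A's dictionary state after the first k blogs and a prefix `pre` of blog k
def pvD (all_dictionary : List (List (String × Int))) (k : Nat) (pre : List (String × Int)) : PySem.Dict String (List Int) :=
  ⟨(PySem.List.dedup (pvKeys all_dictionary k ++ pre.map Prod.fst)).map
      (fun w => (w, pvCol2 all_dictionary k pre w))⟩

theorem pvGw_nil (w : String) : pvGw [] w = 0 := rfl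

theorem pvGw_cons (u : String) (c : Int) (rest : List (String × Int)) (w : String) :
    pvGw ((u, c) :: rest) w = if u == w then c else pvGw rest w := by
  simp only [pvGw, PySem.Dict.getD_eq_get?_getD, PySem.Dict.get?_mk_cons]
  split <;> rfl

theorem pvGw_append (xs ys : List (String × Int)) (w : String) (h : w ∉ xs.map Prod.fst) :
    pvGw (xs ++ ys) w = pvGw ys w := by
  induction xs with
  | nil => simp
  | cons p t ih =>
    simp only [List.map_cons, List.mem_cons, not_or] at h
    rw [List.cons_append, ← Prod.mk.eta (p := p), pvGw_cons,
      if_neg (by simp only [beq_iff_eq]; exact fun hh => h.1 hh.symm)]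
    exact ih h.2

theorem pvGw_eq_zero (blog : List (String × Int)) (w : String) (h : w ∉ blog.map Prod.fst) :
    pvGw blog w = 0 := by
  have := pvGw_append blog [] w h
  simpa using this

theorem pvGw_snoc_self (pre : List (String × Int)) (w : String) (c : Int) (h : w ∉ pre.map Prod.fst) :
    pvGw (pre ++ [(w, c)]) w = c := by
  rw [pvGw_append _ _ _ h, pvGw_cons]
  simp

theorem pvGw_snoc_ne (pre : List (String × Int)) (w : String) (c : Int) (u : String) (h : u ≠ w) :
    pvGw (pre ++ [(w, c)]) u = pvGw pre u := by
  induction pre with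
  | nil =>
    rw [List.nil_append, pvGw_cons,
      if_neg (by simp only [beq_iff_eq]; exact fun hh => h hh.symm)]
  | cons p t ih =>
    rw [List.cons_append, ← Prod.mk.eta (p := p), pvGw_cons, pvGw_cons, ih]

theorem pvDedup_snoc (xs : List String) (x : String) :
    PySem.List.dedup (xs ++ [x]) =
      if x ∈ xs then PySem.List.dedup xs else PySem.List.dedup xs ++ [x] := by
  have h1 : PySem.List.dedup (xs ++ [x]) = PySem.Set.add (PySem.List.dedup xs) x := by
    simp only [PySem.List.dedup_eq_ofList, PySem.Set.ofList, List.foldl_append, List.foldl_cons,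
      List.foldl_nil]
  rw [h1]
  unfold PySem.Set.add
  by_cases hx : x ∈ xs
  · rw [if_pos hx, if_pos (by simpa [PySem.Set.mem_ofList] using hx)]
  · rw [if_neg hx, if_neg (by simpa [PySem.Set.mem_ofList] using hx)]

theorem pvSet_range_map (n k : Nat) (f : Nat → Int) (c : Int) :
    ((List.range n).map f).set k c = (List.range n).map (fun j => if j = k then c else f j) := by
  apply List.ext_getElem
  · simp
  · intro i h1 h2
    simp only [List.getElem_set, List.getElem_map, List.getElem_range]
    split
    · next h => rw [if_pos h.symm]
    · next h => rw [if_neg (fun hh => h hh.symm)]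

-- column update when w is overwritten at position k
theorem pvCol2_snoc_self (all_dictionary : List (List (String × Int))) (k : Nat)
    (pre : List (String × Int)) (w : String) (c : Int)
    (hw : w ∉ pre.map Prod.fst) :
    (pvCol2 all_dictionary k pre w).set k c = pvCol2 all_dictionary k (pre ++ [(w, c)]) w := by
  unfold pvCol2
  rw [pvSet_range_map]
  apply List.map_congr_left
  intro j hj
  by_cases hjk : j = k
  · subst hjk
    rw [if_pos rfl, if_neg (Nat.lt_irrefl j), if_pos rfl, pvGw_snoc_self _ _ _ hw]
  · rw [if_neg hjk]
    by_cases hlt : j < k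
    · rw [if_pos hlt, if_pos hlt]
    · rw [if_neg hlt, if_neg hlt, if_neg hjk, if_neg hjk]

-- a fresh word's column is the zero list with position k set
theorem pvCol2_snoc_fresh (all_dictionary : List (List (String × Int))) (k : Nat)
    (pre : List (String × Int)) (w : String) (c : Int)
    (hw : w ∉ pvKeys all_dictionary k) (hwp : w ∉ pre.map Prod.fst) :
    pvCol2 all_dictionary k (pre ++ [(w, c)]) w
      = (List.replicate all_dictionary.length (0 : Int)).set k c := by
  have hrep : (List.replicate all_dictionary.length (0 : Int))
      = (List.range all_dictionary.length).map (fun _ => (0 : Int)) := by simp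
  rw [hrep, pvSet_range_map]
  unfold pvCol2
  apply List.map_congr_left
  intro j hj
  rw [List.mem_range] at hj
  split_ifs with h1 h2
  · exact absurd h2 (by omega)
  · apply pvGw_eq_zero
    intro hmem
    apply hw
    unfold pvKeys
    refine List.mem_flatMap.mpr ⟨all_dictionary.getD j [], ?_, hmem⟩
    rw [List.getD_eq_getElem _ _ (by omega)]
    have hlen : j < (all_dictionary.take k).length := by simp; omega
    have : all_dictionary[j] = (all_dictionary.take k)[j]'hlen := by
      rw [List.getElem_take]
    rw [this]
    exact List.getElem_mem _
  · exact pvGw_snoc_self _ _ _ hwp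
  · rfl

-- a column of another word is untouched by appending (w, c)
theorem pvCol2_snoc_ne (all_dictionary : List (List (String × Int))) (k : Nat)
    (pre : List (String × Int)) (w : String) (c : Int) (u : String) (h : u ≠ w) :
    pvCol2 all_dictionary k (pre ++ [(w, c)]) u = pvCol2 all_dictionary k pre u := by
  unfold pvCol2
  apply List.map_congr_left
  intro j hj
  by_cases h1 : j < k
  · rw [if_pos h1, if_pos h1]
  · by_cases h2 : j = k
    · rw [if_neg h1, if_neg h1, if_pos h2, if_pos h2, pvGw_snoc_ne _ _ _ _ h]
    · rw [if_neg h1, if_neg h1, if_neg h2, if_neg h2]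

theorem pvD_keys (all_dictionary : List (List (String × Int))) (k : Nat) (pre : List (String × Int)) :
    (pvD all_dictionary k pre).keys
      = PySem.List.dedup (pvKeys all_dictionary k ++ pre.map Prod.fst) := by
  unfold pvD
  simp [PySem.Dict.keys_mk, Function.comp_def]

theorem pvD_keys_nodup (all_dictionary : List (List (String × Int))) (k : Nat) (pre : List (String × Int)) :
    (pvD all_dictionary k pre).keys.Nodup := by
  rw [pvD_keys]
  simp only [PySem.List.dedup_eq_ofList]
  exact PySem.Set.nodup_ofList _

theorem pvD_contains (all_dictionary : List (List (String × Int))) (k : Nat) (pre : List (String × Int)) (w : String) :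
    (pvD all_dictionary k pre).contains w
      = decide (w ∈ pvKeys all_dictionary k ++ pre.map Prod.fst) := by
  rw [PySem.Dict.contains_eq_decide_mem_keys, pvD_keys]
  by_cases h : w ∈ pvKeys all_dictionary k ++ pre.map Prod.fst
  · rw [decide_eq_true h, decide_eq_true (by simpa [PySem.Set.mem_ofList] using h)]
  · rw [decide_eq_false h, decide_eq_false (by simpa [PySem.Set.mem_ofList] using h)]

-- one inner-loop step of A advances the prefix by one pair
theorem pvStep_one (all_dictionary : List (List (String × Int))) (k : Nat)
    (pre : List (String × Int)) (w : String) (c : Int)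
    (hwpre : w ∉ pre.map Prod.fst) :
    (if (pvD all_dictionary k pre).contains w then
        (pvD all_dictionary k pre).insert w
          (PySem.List.pySetD ((pvD all_dictionary k pre).getD w []) (k : Int) c)
      else
        (pvD all_dictionary k pre).insert w
          (PySem.List.pySetD (List.replicate ((all_dictionary.length : Int)).toNat (0 : Int)) (k : Int) c))
      = pvD all_dictionary k (pre ++ [(w, c)]) := by
  have hmapsnoc : (pre ++ [(w, c)]).map Prod.fst = pre.map Prod.fst ++ [w] := by simp
  rw [pvD_contains]
  by_cases hw : w ∈ pvKeys all_dictionary k ++ pre.map Prod.fst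
  · rw [decide_eq_true hw, if_pos rfl]
    have hmem : (w, pvCol2 all_dictionary k pre w) ∈ (pvD all_dictionary k pre).items := by
      unfold pvD
      exact List.mem_map.mpr ⟨w, by simpa [PySem.Set.mem_ofList] using hw, rfl⟩
    have hget : (pvD all_dictionary k pre).getD w [] = pvCol2 all_dictionary k pre w :=
      PySem.Dict.getD_of_mem_items _ hmem (pvD_keys_nodup _ _ _) _
    rw [hget, PySem.List.pySetD_natCast]
    apply PySem.Dict.ext
    rw [PySem.Dict.items_insert_of_contains _ _ (by rw [pvD_contains]; exact decide_eq_true hw)]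
    show List.map _ (pvD all_dictionary k pre).items = (pvD all_dictionary k (pre ++ [(w, c)])).items
    unfold pvD
    show List.map _ (List.map _ _) = _
    rw [List.map_map]
    have hded : PySem.List.dedup (pvKeys all_dictionary k ++ (pre ++ [(w, c)]).map Prod.fst)
        = PySem.List.dedup (pvKeys all_dictionary k ++ pre.map Prod.fst) := by
      rw [hmapsnoc, ← List.append_assoc, pvDedup_snoc, if_pos hw]
    rw [hded]
    apply List.map_congr_left
    intro u hu
    simp only [Function.comp_def]
    by_cases huw : u = w
    · subst huw
      rw [if_pos (by simp), pvCol2_snoc_self _ _ _ _ _ hwpre]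
    · rw [if_neg (by simp [huw]), pvCol2_snoc_ne _ _ _ _ _ _ huw]
  · rw [decide_eq_false hw, if_neg (by simp)]
    have hwK : w ∉ pvKeys all_dictionary k := fun h => hw (List.mem_append.mpr (Or.inl h))
    rw [show ((all_dictionary.length : Int)).toNat = all_dictionary.length from Int.toNat_natCast _,
      PySem.List.pySetD_natCast]
    apply PySem.Dict.ext
    rw [PySem.Dict.items_insert_of_not_contains _ _ (by rw [pvD_contains]; exact decide_eq_false hw)]
    unfold pvD
    have hded : PySem.List.dedup (pvKeys all_dictionary k ++ (pre ++ [(w, c)]).map Prod.fst)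
        = PySem.List.dedup (pvKeys all_dictionary k ++ pre.map Prod.fst) ++ [w] := by
      rw [hmapsnoc, ← List.append_assoc, pvDedup_snoc, if_neg hw]
    rw [hded, List.map_append]
    congr 1
    · apply List.map_congr_left
      intro u hu
      have huw : u ≠ w := by
        intro hh
        subst hh
        exact hw (by simpa [PySem.Set.mem_ofList] using hu)
      rw [pvCol2_snoc_ne _ _ _ _ _ _ huw]
    · rw [List.map_cons, List.map_nil, pvCol2_snoc_fresh _ _ _ _ _ hwK hwpre]

-- the inner loop over a suffix of blog k
theorem pvInner (all_dictionary : List (List (String × Int))) (k : Nat)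
    (suf : List (String × Int)) :
    ∀ pre : List (String × Int), ((pre ++ suf).map Prod.fst).Nodup →
    suf.foldl (fun d p =>
        if d.contains p.1 then
          d.insert p.1 (PySem.List.pySetD (d.getD p.1 []) (k : Int) p.2)
        else
          d.insert p.1 (PySem.List.pySetD (List.replicate ((all_dictionary.length : Int)).toNat (0 : Int)) (k : Int) p.2))
      (pvD all_dictionary k pre)
      = pvD all_dictionary k (pre ++ suf) := by
  induction suf with
  | nil => intro pre _; simp
  | cons p rest ih =>
    intro pre hnd
    obtain ⟨w, c⟩ := p
    have hwpre : w ∉ pre.map Prod.fst := by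
      rw [List.map_append, List.map_cons, List.nodup_append] at hnd
      intro hmem
      exact hnd.2.2 w hmem w (by simp) rfl
    simp only [List.foldl_cons]
    rw [pvStep_one _ _ _ _ _ hwpre]
    have hnd' : ((pre ++ [(w, c)] ++ rest).map Prod.fst).Nodup := by
      simpa using hnd
    rw [ih _ hnd', List.append_assoc]
    simp only [List.singleton_append]

-- completing blog k turns the state into the state for k + 1
theorem pvD_succ (all_dictionary : List (List (String × Int))) (k : Nat)
    (hk : k < all_dictionary.length) :
    pvD all_dictionary k (all_dictionary.getD k []) = pvD all_dictionary (k + 1) [] := by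
  have hkeys : pvKeys all_dictionary (k + 1)
      = pvKeys all_dictionary k ++ (all_dictionary.getD k []).map Prod.fst := by
    unfold pvKeys
    rw [List.take_add_one, List.flatMap_append]
    congr 1
    rw [List.getElem?_eq_getElem hk]
    simp [List.getElem?_eq_getElem hk]
  unfold pvD
  rw [hkeys]
  rw [List.map_nil, List.append_nil]
  apply congrArg
  apply List.map_congr_left
  intro u hu
  apply congrArg
  unfold pvCol2
  apply List.map_congr_left
  intro j hj
  by_cases h1 : j < k
  · rw [if_pos h1, if_pos (by omega)]
  · by_cases h2 : j = k
    · subst h2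
      rw [if_neg h1, if_pos rfl, if_pos (by omega)]
    · rw [if_neg h1, if_neg h2, if_neg (by omega)]
      by_cases h3 : j = k + 1
      · rw [if_pos h3, pvGw_nil]
      · rw [if_neg h3]

-- the outer loop over the blog indices
theorem pvOuter (all_dictionary : List (List (String × Int)))
    (hpre : Pre_combinedictionary all_dictionary) :
    ∀ k : Nat, k ≤ all_dictionary.length →
    (PySem.List.pyRange 0 (k : Int) 1).foldl (fun d i =>
        (PySem.List.pyGetD all_dictionary i []).foldl (fun d p =>
          if d.contains p.1 then
            d.insert p.1 (PySem.List.pySetD (d.getD p.1 []) i p.2)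
          else
            d.insert p.1 (PySem.List.pySetD (List.replicate ((all_dictionary.length : Int)).toNat (0 : Int)) i p.2)) d)
      PySem.Dict.empty
      = pvD all_dictionary k [] := by
  intro k
  induction k with
  | zero =>
    intro _
    rw [show ((0 : Nat) : Int) = 0 from rfl, PySem.List.pyRange_one_eq_nil (by omega)]
    rfl
  | succ k ih =>
    intro hk
    have hklt : k < all_dictionary.length := by omega
    rw [show ((k + 1 : Nat) : Int) = (k : Int) + 1 by push_cast; ring,
      PySem.List.pyRange_one_succ_right (by omega), List.foldl_append,
      ih (by omega), List.foldl_cons, List.foldl_nil]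
    simp only [PySem.List.pyGetD_natCast]
    have hnd : ((([] : List (String × Int)) ++ all_dictionary.getD k []).map Prod.fst).Nodup := by
      rw [List.nil_append]
      apply hpre
      rw [List.getD_eq_getElem _ _ hklt]
      exact List.getElem_mem _
    rw [pvInner all_dictionary k (all_dictionary.getD k []) [] hnd, List.nil_append]
    exact pvD_succ _ _ hklt

-- the final column is B's per-blog gather
theorem pvCol2_final (all_dictionary : List (List (String × Int))) (w : String) :
    pvCol2 all_dictionary all_dictionary.length [] w
      = all_dictionary.map (fun blog => pvGw blog w) := by
  unfold pvCol2
  apply List.ext_getElem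
  · simp
  · intro i h1 h2
    simp only [List.length_map, List.length_range] at h1
    simp only [List.getElem_map, List.getElem_range]
    rw [if_pos h1, List.getD_eq_getElem _ _ h1]

-- ===== VERDICT (by name: the statement is the Claim_ definition above) =====
theorem combinedictionary_spec : Claim_equal_combinedictionary := by
  unfold Claim_equal_combinedictionary
  intro all_dictionary _ hpre
  unfold Spec_combinedictionary
  have h1 : combinedictionary all_dictionary
      = (pvD all_dictionary all_dictionary.length []).items :=
    congrArg PySem.Dict.items (pvOuter all_dictionary hpre all_dictionary.length le_rfl)
  have halt : combinedictionary_alt all_dictionary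
      = (PySem.List.dedup (all_dictionary.flatMap (fun blog => blog.map Prod.fst))).map
          (fun w => (w, all_dictionary.map (fun blog => pvGw blog w))) := rfl
  rw [h1, halt]
  have hkeys : pvKeys all_dictionary all_dictionary.length
      = all_dictionary.flatMap (fun blog => blog.map Prod.fst) := by
    unfold pvKeys
    rw [List.take_length]
  show (PySem.List.dedup (pvKeys all_dictionary all_dictionary.length ++ List.map Prod.fst [])).map
      (fun w => (w, pvCol2 all_dictionary all_dictionary.length [] w)) = _
  rw [List.map_nil, List.append_nil, hkeys]
  apply List.map_congr_left
  intro w hw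
  exact congrArg (Prod.mk w) (pvCol2_final _ _)
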